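-- pv_equiv track=rewrite | github.com/BetterSaas-engg/Garabyte-Privacy | backend/app/services/jurisdictions.py | applicable_regulations
-- ===== SOURCE A (Python) =====
-- from typing import Iterable, Optional
--
-- REGULATION_JURISDICTIONS: dict[str, list[str]] = {
--     "PIPEDA": ["CA"],
--     "Quebec Law 25": ["CA-QC"],
--     "CASL": ["CA"],
--     "GDPR": ["EU"],
--     "CCPA": ["US-CA"],
--     "AIDA": ["CA"],
-- }
--
-- def applicable_regulations(tenant_codes: Optional[Iterable[str]]) -> set[str]:
--     """
--     Return the set of regulation names whose jurisdiction list intersects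
--     the tenant's jurisdiction codes (with sub-national → federal inheritance).
--     Empty/null tenant_codes → every known regulation, plus the implicit
--     "no filtering" semantics: callers should treat the full set as
--     "everything passes."
--     """
--     if not tenant_codes:
--         return set(REGULATION_JURISDICTIONS.keys())
--     tenant_set: set[str] = set()
--     for code in tenant_codes:
--         tenant_set.add(code)
--         if "-" in code:
--             tenant_set.add(code.split("-", 1)[0])
--     return {
--         reg
--         for reg, codes in REGULATION_JURISDICTIONS.items()
--         if any(c in tenant_set for c in codes)
--     }
-- ===== SOURCE B (Python) =====
-- from typing import Iterable, Optional
--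
-- REGULATION_JURISDICTIONS: dict[str, list[str]] = {
--     "PIPEDA": ["CA"],
--     "Quebec Law 25": ["CA-QC"],
--     "CASL": ["CA"],
--     "GDPR": ["EU"],
--     "CCPA": ["US-CA"],
--     "AIDA": ["CA"],
-- }
--
-- def _pick(items: list[tuple[str, list[str]]], expanded: list[str]) -> list[str]:
--     # recursive scan of the regulation table, keeping names whose
--     # jurisdiction list meets the expanded tenant-code list
--     if not items:
--         return []
--     reg, js = items[0]
--     rest = _pick(items[1:], expanded)
--     return [reg] + rest if any(j in expanded for j in js) else rest
--
-- def applicable_regulations(tenant_codes: Optional[Iterable[str]]) -> set[str]: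
--     if not tenant_codes:
--         return set(REGULATION_JURISDICTIONS)
--     expanded = [c for code in tenant_codes
--                 for c in ([code, code.split("-", 1)[0]] if "-" in code else [code])]
--     return set(_pick(list(REGULATION_JURISDICTIONS.items()), expanded))
-- ===== Notes on version B (the rewrite author's own statement) =====
-- stated objective: alternative
-- what changed: B replaces A's mutable expanded-codes set plus a set comprehension over the table by a flat expanded list (each code plus its dash prefix, duplicates allowed) and a recursive picker over the regulation table that conses matching names.
import Mathlib
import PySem

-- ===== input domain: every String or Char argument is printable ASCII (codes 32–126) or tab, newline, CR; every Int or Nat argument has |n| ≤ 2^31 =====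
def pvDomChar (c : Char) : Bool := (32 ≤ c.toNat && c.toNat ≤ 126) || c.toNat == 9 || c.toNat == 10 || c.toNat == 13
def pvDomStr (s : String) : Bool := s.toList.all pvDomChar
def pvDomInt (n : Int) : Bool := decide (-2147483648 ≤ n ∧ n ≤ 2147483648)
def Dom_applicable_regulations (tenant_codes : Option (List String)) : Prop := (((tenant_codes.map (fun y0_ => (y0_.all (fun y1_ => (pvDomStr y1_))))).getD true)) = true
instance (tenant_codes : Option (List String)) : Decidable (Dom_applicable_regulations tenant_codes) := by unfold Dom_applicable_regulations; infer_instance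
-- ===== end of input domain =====

-- B replaces A's accumulated tenant set + comprehension by a flat expanded code list and a recursive picker over the regulation table (alternative decomposition, similar cost).


-- ===== PORT A =====

-- module constant REGULATION_JURISDICTIONS (a dict, as an insertion-ordered association list)
def REGULATION_JURISDICTIONS : PySem.Dict String (List String) :=
  PySem.Dict.mk [("PIPEDA", ["CA"]), ("Quebec Law 25", ["CA-QC"]), ("CASL", ["CA"]),
   ("GDPR", ["EU"]), ("CCPA", ["US-CA"]), ("AIDA", ["CA"])]

-- code.split("-", 1)[0]  (the split list is never empty, so [0] is its head)
def splitDash0 (code : String) : String :=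
  (((PySem.Str.splitMax? code "-" 1).getD []).headD "")

-- loop body of A's tenant_set loop (named so the invariant lemma below can cite it)
def tenantStep (s : PySem.Set String) (code : String) : PySem.Set String :=
  let s := PySem.Set.add s code
  if PySem.Str.isIn "-" code then PySem.Set.add s (splitDash0 code) else s

def applicable_regulations (tenant_codes : Option (List String)) : List String :=
  match tenant_codes with
  | none => PySem.Set.ofList (PySem.Dict.keys REGULATION_JURISDICTIONS)
  | some codes =>
    if codes.isEmpty then PySem.Set.ofList (PySem.Dict.keys REGULATION_JURISDICTIONS)
    else
      -- for code in tenant_codes: tenant_set.add(code); if "-" in code: tenant_set.add(code.split("-",1)[0])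
      let tenant_set : PySem.Set String := codes.foldl tenantStep PySem.Set.empty
      -- {reg for reg, codes in REGULATION_JURISDICTIONS.items() if any(c in tenant_set for c in codes)}
      PySem.Set.ofList ((PySem.Dict.items REGULATION_JURISDICTIONS).filterMap (fun p =>
        if p.2.any (fun c => PySem.Set.contains tenant_set c) then some p.1 else none))

-- ===== PORT B =====

-- the per-code expansion of B's flat comprehension: [code, prefix] if "-" in code else [code]
def expandCode (code : String) : List String :=
  if PySem.Str.isIn "-" code then [code, splitDash0 code] else [code]

-- _pick(items, expanded): recursive scan keeping matching regulation names
def pvPick : List (String × List String) → List String → List String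
  | [], _ => []
  | (reg, js) :: rest, expanded =>
    let r := pvPick rest expanded
    if js.any (fun j => expanded.contains j) then reg :: r else r

def applicable_regulations_alt (tenant_codes : Option (List String)) : List String :=
  match tenant_codes with
  | none => PySem.Set.ofList (PySem.Dict.keys REGULATION_JURISDICTIONS)
  | some codes =>
    if codes.isEmpty then PySem.Set.ofList (PySem.Dict.keys REGULATION_JURISDICTIONS)
    else
      let expanded : List String := codes.flatMap expandCode
      PySem.Set.ofList (pvPick (PySem.Dict.items REGULATION_JURISDICTIONS) expanded)

-- ===== PRECONDITION & SPEC =====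
def Spec_applicable_regulations (tenant_codes : Option (List String)) (out : List String) : Prop := out = applicable_regulations_alt tenant_codes
instance (tenant_codes : Option (List String)) (out : List String) : Decidable (Spec_applicable_regulations tenant_codes out) := by unfold Spec_applicable_regulations; infer_instance

-- ===== CLAIM (what is proved, stated in full; the proofs are below) =====
def Claim_equal_applicable_regulations : Prop := ∀ (tenant_codes : Option (List String)), Dom_applicable_regulations tenant_codes → Spec_applicable_regulations tenant_codes (applicable_regulations tenant_codes)

-- ===== LEMMAS AND PROOFS =====

-- loop invariant for A's tenant_set: its members are exactly the codes and the dash-prefixes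
theorem mem_tenant_set (codes : List String) (s : PySem.Set String) (c : String) :
    (c ∈ codes.foldl tenantStep s) ↔
      c ∈ s ∨ ∃ code ∈ codes, c = code ∨ (PySem.Str.isIn "-" code ∧ c = splitDash0 code) := by
  induction codes generalizing s with
  | nil => simp
  | cons x xs ih =>
    rw [List.foldl_cons, ih]
    by_cases h : PySem.Str.isIn "-" x = true <;>
      simp only [tenantStep, h, if_true, if_false, PySem.Set.mem_add,
        List.exists_mem_cons_iff, Bool.false_eq_true, false_and, true_and,
        or_false, or_assoc]

-- A's membership test in tenant_set coincides with membership in B's flat expanded list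
theorem contains_tenant_set_eq_expanded (codes : List String) (j : String) :
    PySem.Set.contains (codes.foldl tenantStep PySem.Set.empty) j =
      (codes.flatMap expandCode).contains j := by
  rw [Bool.eq_iff_iff, PySem.Set.contains_iff, mem_tenant_set, List.contains_iff_mem,
    List.mem_flatMap]
  simp only [PySem.Set.empty, List.not_mem_nil, false_or]
  constructor
  · rintro ⟨code, hm, hc | ⟨hd, hc⟩⟩
    · exact ⟨code, hm, by simp [expandCode, hc]; split <;> simp⟩
    · refine ⟨code, hm, ?_⟩
      subst hc
      unfold expandCode
      rw [hd]
      simp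
  · rintro ⟨code, hm, hj⟩
    by_cases hd : PySem.Str.isIn "-" code = true
    · simp only [expandCode, hd, if_true, List.mem_cons, List.not_mem_nil, or_false] at hj
      rcases hj with h | h
      · exact ⟨code, hm, Or.inl h⟩
      · exact ⟨code, hm, Or.inr ⟨hd, h⟩⟩
    · simp only [expandCode, hd, if_false, Bool.false_eq_true, List.mem_singleton] at hj
      exact ⟨code, hm, Or.inl hj⟩

-- B's recursive picker equals A's filterMap over the same items
theorem pvPick_eq_filterMap (items : List (String × List String)) (expanded : List String) :
    pvPick items expanded =
      items.filterMap (fun p => if p.2.any (fun c => expanded.contains c) then some p.1 else none) := by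
  induction items with
  | nil => rfl
  | cons p rest ih =>
    obtain ⟨reg, js⟩ := p
    simp only [pvPick, List.filterMap_cons, ih]
    split <;> rfl

-- ===== VERDICT (by name: the statement is the Claim_ definition above) =====
theorem applicable_regulations_spec : Claim_equal_applicable_regulations := by
  intro tc _
  unfold Spec_applicable_regulations applicable_regulations applicable_regulations_alt
  match tc with
  | none => rfl
  | some codes =>
    by_cases h : codes.isEmpty
    · simp [h]
    · simp only [h, if_false, Bool.false_eq_true]
      rw [pvPick_eq_filterMap]
      apply congrArg PySem.Set.ofList
      apply List.filterMap_congr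
      intro p _
      simp only [contains_tenant_set_eq_expanded]
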